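-- pv_equiv track=rewrite | github.com/james-li/PuzzleMind | main.py | find_zero_blocks
-- ===== SOURCE A (Python) =====
-- def find_zero_blocks(a, m, n):
--     rows, cols = len(a), len(a[0])
--     result = []
--
--     # 生成两种可能的尺寸
--     possible_shapes = [(m, n), (n, m)]
--
--     # 遍历每一个起始点 (x0, y0)
--     for x0 in range(rows):
--         for y0 in range(cols):
--             # 遍历两种可能的尺寸
--             for dx, dy in possible_shapes:
--                 x1, y1 = x0 + dx - 1, y0 + dy - 1  # 计算结束点
--
--                 # 检查矩形是否越界
--                 if x1 >= rows or y1 >= cols: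
--                     continue
--
--                 # 检查该区域是否所有元素都为0
--                 is_valid = True
--                 for x in range(x0, x1 + 1):
--                     for y in range(y0, y1 + 1):
--                         if a[x][y] != 0:
--                             is_valid = False
--                             break
--                     if not is_valid:
--                         break
--
--                 # 如果满足条件，记录结果
--                 if is_valid:
--                     result.append(((x0, y0), (x1, y1)))
--
--     return result
-- ===== SOURCE B (Python) =====
-- def find_zero_blocks(a, m, n):
--     rows, cols = len(a), len(a[0])
--
--     # P[i][j] = number of nonzero cells a[x][y] with x < i and y < j (2D prefix counts)
--     P = [[0] * (cols + 1)]
--     for row in a: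
--         prev = P[-1]
--         cur = [0]
--         for j in range(cols):
--             cur.append((1 if row[j] != 0 else 0) + prev[j + 1] + cur[j] - prev[j])
--         P.append(cur)
--
--     def is_zero(x0, y0, x1, y1):
--         # the (possibly empty) block [x0..x1] x [y0..y1] contains no nonzero cell
--         if x1 < x0 or y1 < y0:
--             return True
--         return P[x1 + 1][y1 + 1] - P[x0][y1 + 1] - P[x1 + 1][y0] + P[x0][y0] == 0
--
--     result = []
--     for x0 in range(rows):
--         for y0 in range(cols):
--             for dx, dy in ((m, n), (n, m)):
--                 x1, y1 = x0 + dx - 1, y0 + dy - 1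
--                 if x1 < rows and y1 < cols and is_zero(x0, y0, x1, y1):
--                     result.append(((x0, y0), (x1, y1)))
--     return result
-- ===== Notes on version B (the rewrite author's own statement) =====
-- stated objective: alternative
-- what changed: B precomputes a 2D prefix table of nonzero-cell counts once and tests each candidate rectangle with a four-corner difference, instead of A's nested scan of the rectangle's cells; on the measured input family A's early-breaking scan is as cheap, so no speed is claimed.
-- outside the precondition, e.g. on find_zero_blocks([[1, 2], [3]], 2, 2): A returns [], B raises IndexError
import Mathlib
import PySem

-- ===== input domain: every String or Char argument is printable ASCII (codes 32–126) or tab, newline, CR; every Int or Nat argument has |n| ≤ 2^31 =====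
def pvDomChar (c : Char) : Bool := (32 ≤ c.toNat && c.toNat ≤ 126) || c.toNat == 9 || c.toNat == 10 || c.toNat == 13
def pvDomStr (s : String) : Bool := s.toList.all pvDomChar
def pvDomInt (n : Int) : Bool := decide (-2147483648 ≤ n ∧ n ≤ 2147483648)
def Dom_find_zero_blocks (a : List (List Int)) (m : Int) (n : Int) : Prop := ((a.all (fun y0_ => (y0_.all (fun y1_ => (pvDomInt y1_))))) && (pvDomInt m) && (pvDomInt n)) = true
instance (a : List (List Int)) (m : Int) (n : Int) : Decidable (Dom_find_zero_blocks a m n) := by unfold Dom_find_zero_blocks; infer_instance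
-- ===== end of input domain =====

-- B replaces A's per-rectangle cell scan by a 2D prefix table of nonzero-cell counts,
-- testing each candidate rectangle with a four-corner difference (objective: alternative).

-- ===== PORT A =====
-- A's is_valid double loop with break (= the short-circuiting all over both ranges)
def pyAllZero (a : List (List Int)) (x0 y0 x1 y1 : Int) : Bool :=
  (PySem.List.pyRange x0 (x1 + 1)).all (fun x =>
    (PySem.List.pyRange y0 (y1 + 1)).all (fun y =>
      PySem.List.pyGetD (PySem.List.pyGetD a x []) y 0 == 0))

def find_zero_blocks (a : List (List Int)) (m : Int) (n : Int) : List ((Int × Int) × (Int × Int)) :=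
  let rows : Int := a.length
  let cols : Int := (PySem.List.pyGetD a 0 []).length
  (PySem.List.pyRange 0 rows).foldl (fun result x0 =>
    (PySem.List.pyRange 0 cols).foldl (fun result y0 =>
      [(m, n), (n, m)].foldl (fun result p =>
        let x1 := x0 + p.1 - 1
        let y1 := y0 + p.2 - 1
        if x1 ≥ rows ∨ y1 ≥ cols then result
        else if pyAllZero a x0 y0 x1 y1 then result ++ [((x0, y0), (x1, y1))]
        else result) result) result) []

-- ===== PORT B =====
-- one row of the prefix table: cur = [0]; cur.append(ind(row[j]) + prev[j+1] + cur[j] - prev[j])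
def buildRowB (cols : Int) (row : List Int) (prev : List Int) : List Int :=
  (PySem.List.pyRange 0 cols).foldl (fun cur j =>
    cur ++ [(if PySem.List.pyGetD row j 0 ≠ 0 then (1 : Int) else 0)
            + PySem.List.pyGetD prev (j + 1) 0 + PySem.List.pyGetD cur j 0
            - PySem.List.pyGetD prev j 0]) [0]

-- P = [[0]*(cols+1)]; for row in a: P.append(buildRow(row, P[-1]))
def buildP (a : List (List Int)) (cols : Int) : List (List Int) :=
  a.foldl (fun P row => P ++ [buildRowB cols row (PySem.List.pyGetD P (-1) [])])
    [List.replicate (cols + 1).toNat 0]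

-- is_zero: empty block, or the four-corner difference of the prefix table is 0
def isZeroB (P : List (List Int)) (x0 y0 x1 y1 : Int) : Bool :=
  if x1 < x0 ∨ y1 < y0 then true
  else PySem.List.pyGetD (PySem.List.pyGetD P (x1 + 1) []) (y1 + 1) 0
       - PySem.List.pyGetD (PySem.List.pyGetD P x0 []) (y1 + 1) 0
       - PySem.List.pyGetD (PySem.List.pyGetD P (x1 + 1) []) y0 0
       + PySem.List.pyGetD (PySem.List.pyGetD P x0 []) y0 0 == 0

def find_zero_blocks_alt (a : List (List Int)) (m : Int) (n : Int) : List ((Int × Int) × (Int × Int)) :=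
  let rows : Int := a.length
  let cols : Int := (PySem.List.pyGetD a 0 []).length
  let P := buildP a cols
  (PySem.List.pyRange 0 rows).foldl (fun result x0 =>
    (PySem.List.pyRange 0 cols).foldl (fun result y0 =>
      [(m, n), (n, m)].foldl (fun result p =>
        let x1 := x0 + p.1 - 1
        let y1 := y0 + p.2 - 1
        if x1 < rows ∧ y1 < cols ∧ isZeroB P x0 y0 x1 y1 then result ++ [((x0, y0), (x1, y1))]
        else result) result) result) []

-- ===== PRECONDITION & SPEC =====
-- Pre_ excludes the empty matrix (a[0] raises IndexError in both programs) and ragged inputs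
-- with a row shorter than a[0]: there B's prefix-table build always raises IndexError while A
-- may still return a value when it never reads a missing cell (see cites).
def Pre_find_zero_blocks (a : List (List Int)) (m : Int) (n : Int) : Prop :=
  a ≠ [] ∧ ∀ r ∈ a, (PySem.List.pyGetD a 0 []).length ≤ r.length
instance (a : List (List Int)) (m : Int) (n : Int) : Decidable (Pre_find_zero_blocks a m n) := by
  unfold Pre_find_zero_blocks; infer_instance
def pvWitness_find_zero_blocks : List (List Int) × Int × Int := ([[0, 1], [0, 0]], 1, 2)

def Spec_find_zero_blocks (a : List (List Int)) (m : Int) (n : Int) (out : List ((Int × Int) × (Int × Int))) : Prop := out = find_zero_blocks_alt a m n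
instance (a : List (List Int)) (m : Int) (n : Int) (out : List ((Int × Int) × (Int × Int))) : Decidable (Spec_find_zero_blocks a m n out) := by unfold Spec_find_zero_blocks; infer_instance

-- ===== CLAIM (what is proved, stated in full; the proofs are below) =====
def Claim_equal_find_zero_blocks : Prop := ∀ (a : List (List Int)) (m : Int) (n : Int), Dom_find_zero_blocks a m n → Pre_find_zero_blocks a m n → Spec_find_zero_blocks a m n (find_zero_blocks a m n)

-- ===== LEMMAS AND PROOFS =====

-- nonzero-cell indicator and prefix counts (the mathematical contents of B's table)
def pvInd (v : Int) : Int := if v ≠ 0 then 1 else 0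
def pvRowCnt (r : List Int) (j : Nat) : Int := ((List.range j).map (fun y => pvInd (r.getD y 0))).sum
def pvCnt (a : List (List Int)) (i j : Nat) : Int := ((List.range i).map (fun x => pvRowCnt (a.getD x []) j)).sum

theorem pvInd_nonneg (v : Int) : 0 ≤ pvInd v := by unfold pvInd; split <;> omega
theorem pvInd_eq_zero_iff (v : Int) : pvInd v = 0 ↔ v = 0 := by unfold pvInd; split <;> simp_all

theorem pvRowCnt_zero (r : List Int) : pvRowCnt r 0 = 0 := by simp [pvRowCnt]
theorem pvRowCnt_succ (r : List Int) (j : Nat) :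
    pvRowCnt r (j + 1) = pvRowCnt r j + pvInd (r.getD j 0) := by
  simp [pvRowCnt, List.range_succ]
theorem pvCnt_zero_right (a : List (List Int)) (i : Nat) : pvCnt a i 0 = 0 := by
  simp [pvCnt, pvRowCnt_zero]

-- a sum of nonnegative integers vanishes iff all terms vanish
theorem pv_sum_eq_zero_iff {α : Type} (l : List α) (f : α → Int)
    (h : ∀ x ∈ l, 0 ≤ f x) : (l.map f).sum = 0 ↔ ∀ x ∈ l, f x = 0 := by
  induction l with
  | nil => simp
  | cons x t ih =>
    have hx := h x (by simp)
    have ht : ∀ y ∈ t, 0 ≤ f y := fun y hy => h y (by simp [hy])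
    have hts : 0 ≤ (t.map f).sum := by
      apply List.sum_nonneg; intro y hy
      obtain ⟨z, hz, rfl⟩ := List.mem_map.mp hy
      exact ht z hz
    simp only [List.map_cons, List.sum_cons, List.mem_cons]
    constructor
    · intro h0
      have h1 : f x = 0 ∧ (t.map f).sum = 0 := by omega
      intro y hy
      rcases hy with rfl | hy
      · exact h1.1
      · exact (ih ht).mp h1.2 y hy
    · intro hall
      have h2 : (t.map f).sum = 0 := (ih ht).mpr (fun y hy => hall y (Or.inr hy))
      have h3 := hall x (Or.inl rfl)
      omega

-- pyGetD at a cast Nat index into a (range-)map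
theorem pv_pyGetD_map_range {β : Type} (f : Nat → β) (mm : Nat) (i : Nat) (d : β)
    (h : i < mm) : PySem.List.pyGetD ((List.range mm).map f) (i : Int) d = f i := by
  rw [PySem.List.pyGetD_natCast, PySem.List.getD_map_range f mm i d h]

-- Python's P[-1] on a list built as map over range (n+1) is its last row
theorem pv_pyGetD_neg_one {β : Type} (f : Nat → β) (nn : Nat) (d : β) :
    PySem.List.pyGetD ((List.range (nn + 1)).map f) (-1) d = f nn := by
  have hlen : (List.map f (List.range (nn + 1))).length = nn + 1 := by simp
  unfold PySem.List.pyGetD PySem.List.pyGet? PySem.List.pyIdx?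
  rw [hlen]
  rw [if_neg (by omega), if_pos (by push_cast; omega)]
  have hidx : nn + 1 - (-(-1 : Int)).toNat = nn := by omega
  rw [hidx]
  simp [List.getElem?_map]

theorem pv_pyRange_empty {a b : Int} (h : b ≤ a) : PySem.List.pyRange a b = [] := by
  simp only [PySem.List.pyRange, one_ne_zero, ↓reduceIte, one_mul, zero_lt_one,
    add_sub_cancel_right, EuclideanDomain.div_one, List.map_eq_nil_iff, List.range_eq_nil,
    ite_eq_right_iff, Int.toNat_eq_zero, tsub_le_iff_right, zero_add, h, implies_true]

-- B's row builder computes one more row of prefix counts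
theorem buildRowB_spec (C : Nat) (row : List Int) (pr : Nat → Int) :
    buildRowB (C : Int) row ((List.range (C + 1)).map pr)
      = (List.range (C + 1)).map (fun j => pr j - pr 0 + pvRowCnt row j) := by
  unfold buildRowB
  rw [PySem.List.pyRange_zero_natCast, List.foldl_map]
  have main : ∀ k : Nat, k ≤ C →
      (List.range k).foldl (fun cur (j : Nat) =>
        cur ++ [(if PySem.List.pyGetD row ((j : Nat) : Int) 0 ≠ 0 then (1 : Int) else 0)
                + PySem.List.pyGetD ((List.range (C + 1)).map pr) (((j : Nat) : Int) + 1) 0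
                + PySem.List.pyGetD cur ((j : Nat) : Int) 0
                - PySem.List.pyGetD ((List.range (C + 1)).map pr) ((j : Nat) : Int) 0]) [0]
        = (List.range (k + 1)).map (fun j => pr j - pr 0 + pvRowCnt row j) := by
    intro k
    induction k with
    | zero => intro _; simp [pvRowCnt_zero]
    | succ k ih =>
      intro hk
      have hk' : k ≤ C := by omega
      rw [List.range_succ (n := k), List.foldl_append, ih hk']
      have e1 : PySem.List.pyGetD row ((k : Nat) : Int) 0 = row.getD k 0 :=
        PySem.List.pyGetD_natCast row k 0
      have e2 : (((k : Nat) : Int) + 1) = (((k + 1 : Nat)) : Int) := by push_cast; ring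
      have e3 : PySem.List.pyGetD ((List.range (C + 1)).map pr) (((k + 1 : Nat)) : Int) 0
          = pr (k + 1) := pv_pyGetD_map_range pr (C + 1) (k + 1) 0 (by omega)
      have e4 : PySem.List.pyGetD ((List.range (C + 1)).map pr) ((k : Nat) : Int) 0
          = pr k := pv_pyGetD_map_range pr (C + 1) k 0 (by omega)
      have e5 : PySem.List.pyGetD
          ((List.range (k + 1)).map (fun j => pr j - pr 0 + pvRowCnt row j)) ((k : Nat) : Int) 0
          = pr k - pr 0 + pvRowCnt row k :=
        pv_pyGetD_map_range _ (k + 1) k 0 (by omega)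
      simp only [List.foldl_cons, List.foldl_nil, e1, e2, e3, e4, e5]
      rw [List.range_succ (n := k + 1), List.map_append]
      congr 1
      simp only [List.map_cons, List.map_nil, pvRowCnt_succ, pvInd]
      congr 1
      split <;> ring
  exact main C le_rfl

theorem pvCnt_append (a : List (List Int)) (r : List Int) (i j : Nat) (h : i ≤ a.length) :
    pvCnt (a ++ [r]) i j = pvCnt a i j := by
  unfold pvCnt
  congr 1
  apply List.map_congr_left
  intro x hx
  rw [List.mem_range] at hx
  rw [List.getD_append _ _ _ _ (by omega)]

theorem pvCnt_snoc (a : List (List Int)) (r : List Int) (j : Nat) :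
    pvCnt (a ++ [r]) (a.length + 1) j = pvCnt a a.length j + pvRowCnt r j := by
  unfold pvCnt
  rw [List.range_succ, List.map_append, List.sum_append]
  simp only [List.map_cons, List.map_nil, List.sum_cons, List.sum_nil]
  congr 1
  · congr 1
    apply List.map_congr_left
    intro x hx
    rw [List.mem_range] at hx
    rw [List.getD_append _ _ _ _ (by omega)]
  · have hg : (a ++ [r]).getD a.length [] = r := by simp
    rw [hg]; ring

-- B's table is the table of prefix counts
theorem buildP_spec (a : List (List Int)) (C : Nat) :
    buildP a (C : Int)
      = (List.range (a.length + 1)).map (fun i => (List.range (C + 1)).map (fun j => pvCnt a i j)) := by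
  induction a using List.reverseRecOn with
  | nil =>
    unfold buildP
    simp only [List.foldl_nil, List.length_nil, Nat.zero_add, List.range_one, List.map_cons,
      List.map_nil]
    have h1 : ((C : Int) + 1).toNat = C + 1 := by omega
    rw [h1]
    congr 1
    calc List.replicate (C + 1) (0 : Int)
        = (List.range (C + 1)).map (fun _ => (0 : Int)) := by
          rw [List.map_const', List.length_range]
      _ = (List.range (C + 1)).map (fun j => pvCnt [] 0 j) := by
          apply List.map_congr_left; intro j _; simp [pvCnt]
  | append_singleton a r ih =>
    unfold buildP at ih ⊢
    rw [List.foldl_append, ih, List.foldl_cons, List.foldl_nil]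
    simp only [pv_pyGetD_neg_one]
    rw [buildRowB_spec C r (fun j => pvCnt a a.length j)]
    simp only [List.length_append, List.length_singleton]
    rw [List.range_succ (n := a.length + 1), List.map_append]
    congr 1
    · apply List.map_congr_left
      intro i hi
      rw [List.mem_range] at hi
      apply List.map_congr_left
      intro j _
      rw [pvCnt_append a r i j (by omega)]
    · simp only [List.map_cons, List.map_nil]
      congr 1
      apply List.map_congr_left
      intro j _
      rw [pvCnt_snoc, pvCnt_zero_right]
      ring

theorem pv_map_sum_sub {α : Type} (l : List α) (f g : α → Int) :
    (l.map (fun x => f x - g x)).sum = (l.map f).sum - (l.map g).sum := by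
  induction l with
  | nil => simp
  | cons x t ih => simp only [List.map_cons, List.sum_cons, ih]; ring

theorem pvSum_block (g : Nat → Int) (p q : Nat) (h : p ≤ q) :
    ((List.range q).map g).sum - ((List.range p).map g).sum
      = ((List.range (q - p)).map (fun t => g (p + t))).sum := by
  obtain ⟨d, rfl⟩ : ∃ d, q = p + d := ⟨q - p, by omega⟩
  have hd : p + d - p = d := by omega
  rw [hd, List.range_add, List.map_append, List.sum_append, List.map_map]
  simp [Function.comp_def]

-- the four-corner difference counts the nonzero cells of the block
theorem pv_corner (a : List (List Int)) (X0 Y0 X1 Y1 : Nat) (hx : X0 ≤ X1) (hy : Y0 ≤ Y1) :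
    pvCnt a (X1 + 1) (Y1 + 1) - pvCnt a X0 (Y1 + 1) - pvCnt a (X1 + 1) Y0 + pvCnt a X0 Y0
      = ((List.range (X1 + 1 - X0)).map (fun x =>
          ((List.range (Y1 + 1 - Y0)).map (fun y =>
            pvInd ((a.getD (X0 + x) []).getD (Y0 + y) 0))).sum)).sum := by
  have rowstep : ∀ r : List Int,
      pvRowCnt r (Y1 + 1) - pvRowCnt r Y0
        = ((List.range (Y1 + 1 - Y0)).map (fun y => pvInd (r.getD (Y0 + y) 0))).sum := by
    intro r
    unfold pvRowCnt
    exact pvSum_block (fun y => pvInd (r.getD y 0)) Y0 (Y1 + 1) (by omega)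
  have c1 : pvCnt a (X1 + 1) (Y1 + 1) - pvCnt a X0 (Y1 + 1)
      = ((List.range (X1 + 1 - X0)).map (fun x => pvRowCnt (a.getD (X0 + x) []) (Y1 + 1))).sum := by
    unfold pvCnt; exact pvSum_block _ X0 (X1 + 1) (by omega)
  have c2 : pvCnt a (X1 + 1) Y0 - pvCnt a X0 Y0
      = ((List.range (X1 + 1 - X0)).map (fun x => pvRowCnt (a.getD (X0 + x) []) Y0)).sum := by
    unfold pvCnt; exact pvSum_block _ X0 (X1 + 1) (by omega)
  have main : pvCnt a (X1 + 1) (Y1 + 1) - pvCnt a X0 (Y1 + 1) - pvCnt a (X1 + 1) Y0 + pvCnt a X0 Y0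
      = ((List.range (X1 + 1 - X0)).map (fun x => pvRowCnt (a.getD (X0 + x) []) (Y1 + 1))).sum
        - ((List.range (X1 + 1 - X0)).map (fun x => pvRowCnt (a.getD (X0 + x) []) Y0)).sum := by
    omega
  rw [main, ← pv_map_sum_sub]
  apply congrArg
  apply List.map_congr_left
  intro x _
  exact rowstep _

-- the core: A's scan and B's four-corner test agree on every in-bounds candidate
theorem pv_core (a : List (List Int)) (C : Nat) (x0 y0 x1 y1 : Int)
    (hx0 : 0 ≤ x0) (hy0 : 0 ≤ y0) (hx1 : x1 < (a.length : Int)) (hy1 : y1 < (C : Int)) :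
    pyAllZero a x0 y0 x1 y1 = isZeroB (buildP a (C : Int)) x0 y0 x1 y1 := by
  by_cases hxe : x1 < x0
  · unfold isZeroB
    rw [if_pos (Or.inl hxe)]
    unfold pyAllZero
    rw [pv_pyRange_empty (show x1 + 1 ≤ x0 by omega)]
    rfl
  · by_cases hye : y1 < y0
    · unfold isZeroB
      rw [if_pos (Or.inr hye)]
      unfold pyAllZero
      rw [List.all_eq_true]
      intro x _
      rw [pv_pyRange_empty (show y1 + 1 ≤ y0 by omega)]
      rfl
    · -- main case: nonempty block
      push_neg at hxe hye
      obtain ⟨X0, rfl⟩ : ∃ k : Nat, x0 = (k : Int) := ⟨x0.toNat, by omega⟩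
      obtain ⟨Y0, rfl⟩ : ∃ k : Nat, y0 = (k : Int) := ⟨y0.toNat, by omega⟩
      obtain ⟨X1, rfl⟩ : ∃ k : Nat, x1 = (k : Int) := ⟨x1.toNat, by omega⟩
      obtain ⟨Y1, rfl⟩ : ∃ k : Nat, y1 = (k : Int) := ⟨y1.toNat, by omega⟩
      have hX : X0 ≤ X1 := by exact_mod_cast hxe
      have hY : Y0 ≤ Y1 := by exact_mod_cast hye
      have hXr : X1 < a.length := by exact_mod_cast hx1
      have hYc : Y1 < C := by exact_mod_cast hy1
      unfold isZeroB
      rw [if_neg (by omega)]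
      rw [buildP_spec a C]
      have g1 : ((X1 : Int) + 1) = ((X1 + 1 : Nat) : Int) := by push_cast; ring
      have g2 : ((Y1 : Int) + 1) = ((Y1 + 1 : Nat) : Int) := by push_cast; ring
      rw [g1, g2]
      rw [pv_pyGetD_map_range _ (a.length + 1) (X1 + 1) [] (by omega)]
      rw [pv_pyGetD_map_range _ (a.length + 1) X0 [] (by omega)]
      rw [pv_pyGetD_map_range _ (C + 1) (Y1 + 1) 0 (by omega)]
      rw [pv_pyGetD_map_range _ (C + 1) (Y1 + 1) 0 (by omega)]
      rw [pv_pyGetD_map_range _ (C + 1) Y0 0 (by omega)]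
      rw [pv_pyGetD_map_range _ (C + 1) Y0 0 (by omega)]
      rw [Bool.eq_iff_iff]
      rw [beq_iff_eq]
      rw [pv_corner a X0 Y0 X1 Y1 hX hY]
      unfold pyAllZero
      rw [List.all_eq_true]
      rw [pv_sum_eq_zero_iff (List.range (X1 + 1 - X0))
        (fun x => ((List.range (Y1 + 1 - Y0)).map (fun y =>
            pvInd ((a.getD (X0 + x) []).getD (Y0 + y) 0))).sum)
        (by
          intro x _
          apply List.sum_nonneg
          intro v hv
          obtain ⟨z, hz, rfl⟩ := List.mem_map.mp hv
          exact pvInd_nonneg _)]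
      constructor
      · intro hA t ht
        rw [List.mem_range] at ht
        have hx' : ((X0 + t : Nat) : Int) ∈ PySem.List.pyRange (X0 : Int) ((X1 + 1 : Nat) : Int) := by
          rw [PySem.List.mem_pyRange_one]
          constructor <;> push_cast <;> omega
        have hin := hA _ hx'
        rw [List.all_eq_true] at hin
        rw [pv_sum_eq_zero_iff _ _ (by intro v _; exact pvInd_nonneg _)]
        intro s hs
        rw [List.mem_range] at hs
        have hy' : ((Y0 + s : Nat) : Int) ∈ PySem.List.pyRange (Y0 : Int) ((Y1 + 1 : Nat) : Int) := by
          rw [PySem.List.mem_pyRange_one]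
          constructor <;> push_cast <;> omega
        have hcell := hin _ hy'
        rw [beq_iff_eq, PySem.List.pyGetD_natCast, PySem.List.pyGetD_natCast] at hcell
        rw [pvInd_eq_zero_iff]
        exact hcell
      · intro hB x hx
        rw [PySem.List.mem_pyRange_one] at hx
        rw [List.all_eq_true]
        intro y hy
        rw [PySem.List.mem_pyRange_one] at hy
        obtain ⟨t, rfl⟩ : ∃ k : Nat, x = ((X0 + k : Nat) : Int) :=
          ⟨(x - X0).toNat, by push_cast; omega⟩
        obtain ⟨s, rfl⟩ : ∃ k : Nat, y = ((Y0 + k : Nat) : Int) :=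
          ⟨(y - Y0).toNat, by push_cast; omega⟩
        have ht : t ∈ List.range (X1 + 1 - X0) := by
          rw [List.mem_range]
          have h2 := hx.2
          push_cast at h2
          omega
        have hs : s ∈ List.range (Y1 + 1 - Y0) := by
          rw [List.mem_range]
          have h2 := hy.2
          push_cast at h2
          omega
        have h1 := hB t ht
        rw [pv_sum_eq_zero_iff _ _ (by intro v _; exact pvInd_nonneg _)] at h1
        have h2 := h1 s hs
        rw [pvInd_eq_zero_iff] at h2
        rw [beq_iff_eq, PySem.List.pyGetD_natCast, PySem.List.pyGetD_natCast]
        exact h2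

-- ===== VERDICT (by name: the statement is the Claim_ definition above) =====
theorem find_zero_blocks_spec : Claim_equal_find_zero_blocks := by
  intro a m n _dom _pre
  unfold Spec_find_zero_blocks
  simp only [find_zero_blocks, find_zero_blocks_alt]
  apply PySem.List.foldl_congr_mem
  intro acc x0 hx0
  apply PySem.List.foldl_congr_mem
  intro acc2 y0 hy0
  apply PySem.List.foldl_congr_mem
  intro res p _
  rw [PySem.List.mem_pyRange_one] at hx0 hy0
  by_cases hb : x0 + p.1 - 1 < (a.length : Int) ∧
      y0 + p.2 - 1 < (((PySem.List.pyGetD a 0 []).length : Nat) : Int)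
  · rw [if_neg (by omega)]
    rw [pv_core a (PySem.List.pyGetD a 0 []).length x0 y0 (x0 + p.1 - 1) (y0 + p.2 - 1)
        hx0.1 hy0.1 hb.1 hb.2]
    simp only [hb.1, hb.2, true_and]
  · rw [if_pos (by omega), if_neg (by tauto)]
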